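-- pv_equiv track=rewrite | github.com/kennedymeadows/probability_theory_project | problem_two.py | generate_copeland_erdos
-- ===== SOURCE A (Python) =====
-- def is_prime(n):
--     """ Check if a number is prime """
--     if n <= 1:
--         return False
--     if n <= 3:
--         return True
--     if n % 2 == 0 or n % 3 == 0:
--         return False
--     i = 5
--     while i * i <= n:
--         if n % i == 0 or n % (i + 2) == 0:
--             return False
--         i += 6
--     return True
--
-- def generate_copeland_erdos(length):
--     """ Generate a binary string representing the Copeland-Erdös constant up to a certain length """
--     copeland_erdos = ""
--     num = 2  # Start from the first prime number
--     while len(copeland_erdos) < length: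
--         if is_prime(num):
--             copeland_erdos += bin(num)[2:]  # Remove '0b' prefix from binary representation
--         num += 1
--     return copeland_erdos[:length]
-- ===== SOURCE B (Python) =====
-- def generate_copeland_erdos(length):
--     """ Generate a binary string representing the Copeland-Erdos constant up to a certain length """
--     parts = []
--     total = 0
--     primes = []  # all primes found so far, ascending
--     num = 2
--     while total < length:
--         is_p = True
--         for p in primes:
--             if p * p > num:
--                 break
--             if num % p == 0:
--                 is_p = False
--                 break
--         if is_p:
--             primes.append(num)
--             b = format(num, 'b')
--             parts.append(b)
--             total += len(b)
--         num += 1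
--     return ''.join(parts)[:length]
-- ===== Notes on version B (the rewrite author's own statement) =====
-- stated objective: faster
-- what changed: B keeps the list of primes found so far and trial-divides each candidate only by those primes up to its square root (collecting the binary chunks in a list joined once), instead of A's per-candidate 6k±1 trial division over all potential divisors and repeated string concatenation.
import Mathlib
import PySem

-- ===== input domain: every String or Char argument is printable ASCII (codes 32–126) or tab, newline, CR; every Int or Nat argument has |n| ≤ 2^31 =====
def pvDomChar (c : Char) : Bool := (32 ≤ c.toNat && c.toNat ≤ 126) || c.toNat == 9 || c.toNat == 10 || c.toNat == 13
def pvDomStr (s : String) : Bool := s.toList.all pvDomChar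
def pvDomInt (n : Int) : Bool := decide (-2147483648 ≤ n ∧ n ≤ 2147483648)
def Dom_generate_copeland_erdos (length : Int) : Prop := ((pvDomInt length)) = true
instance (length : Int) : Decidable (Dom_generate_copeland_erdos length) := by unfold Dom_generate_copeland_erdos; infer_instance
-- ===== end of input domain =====

-- B replaces A's per-candidate 6k±1 trial division and repeated string concatenation by trial
-- division over the list of primes found so far plus a parts-list joined once (objective: faster,
-- measured).
-- Strings are handled as their character lists (the PySem.Chars convention); both ports share the
-- helper binChars, the exact port of Python's bin(n)[2:] / format(n, 'b') for n ≥ 1.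
-- Both outer 'while' loops terminate because primes never run out, which is not structural, so
-- both ports carry the same large fuel counter pvFuel as a totality guard only.

-- binary digits of n without the '0b' prefix: bin(n)[2:] (= format(n,'b')) for n ≥ 1
def binChars (n : Nat) : List Char :=
  if n = 0 then [] else binChars (n / 2) ++ [if n % 2 = 1 then '1' else '0']

-- fuel for the two while-loops (totality guard only; never reached for |length| ≤ 2^31)
def pvFuel : Nat := 1099511627776

-- ===== PORT A =====
-- inner while of is_prime: i = 5; while i*i <= n: …; i += 6
def pvIsPrimeLoop (n i : Nat) : Bool :=
  if h : i * i ≤ n then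
    if n % i = 0 || n % (i + 2) = 0 then false
    else pvIsPrimeLoop n (i + 6)
  else true
termination_by n + 1 - i
decreasing_by
  rcases Nat.eq_zero_or_pos i with h0 | h0
  · omega
  · have : i ≤ i * i := Nat.le_mul_of_pos_left i h0
    omega

-- is_prime(n); called only on nonnegative ints, where Python's arithmetic agrees with Nat's
def pvIsPrime (n : Nat) : Bool :=
  if n ≤ 1 then false
  else if n ≤ 3 then true
  else if n % 2 = 0 || n % 3 = 0 then false
  else pvIsPrimeLoop n 5

-- while len(copeland_erdos) < length: if is_prime(num): copeland_erdos += bin(num)[2:]; num += 1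
def pvLoopA (fuel : Nat) (acc : List Char) (num : Nat) (length : Int) : List Char :=
  match fuel with
  | 0 => acc
  | fuel + 1 =>
    if (acc.length : Int) < length then
      pvLoopA fuel (if pvIsPrime num then acc ++ binChars num else acc) (num + 1) length
    else acc

def generate_copeland_erdos (length : Int) : String :=
  String.ofList (PySem.List.slice (pvLoopA pvFuel [] 2 length) none (some length))

-- ===== PORT B =====
-- for p in primes: if p*p > num: break; if num % p == 0: is_p = False; break
def pvTrialDiv (num : Nat) : List Nat → Bool
  | [] => true
  | p :: ps => if p * p > num then true else if num % p = 0 then false else pvTrialDiv num ps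

-- while total < length: trial-divide num by the stored primes; append chunk and prime on success
def pvLoopB (fuel : Nat) (parts : List (List Char)) (total : Int) (primes : List Nat)
    (num : Nat) (length : Int) : List (List Char) :=
  match fuel with
  | 0 => parts
  | fuel + 1 =>
    if total < length then
      if pvTrialDiv num primes then
        pvLoopB fuel (parts ++ [binChars num]) (total + ((binChars num).length : Int))
          (primes ++ [num]) (num + 1) length
      else pvLoopB fuel parts total primes (num + 1) length
    else parts

def generate_copeland_erdos_alt (length : Int) : String :=
  String.ofList (PySem.List.slice (pvLoopB pvFuel [] 0 [] 2 length).flatten none (some length))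

-- ===== PRECONDITION & SPEC =====
def Spec_generate_copeland_erdos (length : Int) (out : String) : Prop := out = generate_copeland_erdos_alt length
instance (length : Int) (out : String) : Decidable (Spec_generate_copeland_erdos length out) := by unfold Spec_generate_copeland_erdos; infer_instance

-- ===== CLAIM (what is proved, stated in full; the proofs are below) =====
def Claim_equal_generate_copeland_erdos : Prop := ∀ (length : Int), Dom_generate_copeland_erdos length → Spec_generate_copeland_erdos length (generate_copeland_erdos length)

-- ===== LEMMAS AND PROOFS =====

-- the primes below k, ascending: the invariant value of B's `primes` list when `num = k`
def primesBelow (k : Nat) : List Nat := (List.range k).filter (fun p => decide (Nat.Prime p))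

-- A's wheel loop decides primality, given that no divisor below i exists
theorem loopA_eq (n i : Nat) (h2 : ¬ 2 ∣ n) (h3 : ¬ 3 ∣ n) (h4 : 3 < n) (hi : i % 6 = 5)
    (hsmall : ∀ m, 2 ≤ m → m < i → m * m ≤ n → ¬ m ∣ n) :
    pvIsPrimeLoop n i = decide (Nat.Prime n) := by
  rw [pvIsPrimeLoop]
  split
  case isTrue h =>
    have hi5 : 5 ≤ i := by omega
    by_cases hdiv : n % i = 0 || n % (i + 2) = 0
    · rw [if_pos hdiv]
      have hnp : ¬ Nat.Prime n := by
        intro hp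
        have hdiv' : n % i = 0 ∨ n % (i + 2) = 0 := by simpa using hdiv
        rcases hdiv' with hd | hd
        · have hdd : i ∣ n := Nat.dvd_of_mod_eq_zero hd
          have hlt : i < n := by nlinarith
          rcases hp.eq_one_or_self_of_dvd i hdd with h1 | h1 <;> omega
        · have hdd : (i + 2) ∣ n := Nat.dvd_of_mod_eq_zero hd
          have hle : i + 2 ≤ n := Nat.le_of_dvd (by omega) hdd
          have hlt : i + 2 < n := by
            rcases Nat.lt_or_ge (i + 2) n with h' | h'
            · exact h'
            · have : n = i + 2 := by omega
              nlinarith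
          rcases hp.eq_one_or_self_of_dvd (i + 2) hdd with h1 | h1 <;> omega
      simp [hnp]
    · rw [if_neg hdiv]
      have hni : ¬ n % i = 0 := by
        intro hc; exact hdiv (by simp [hc])
      have hni2 : ¬ n % (i + 2) = 0 := by
        intro hc; exact hdiv (by simp [hc])
      apply loopA_eq n (i + 6) h2 h3 h4 (by omega)
      intro m hm2 hmlt hmsq hmdvd
      by_cases hlt : m < i
      · exact hsmall m hm2 hlt hmsq hmdvd
      · have hcases : m = i ∨ m = i + 1 ∨ m = i + 2 ∨ m = i + 3 ∨ m = i + 4 ∨ m = i + 5 := by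
          omega
        rcases hcases with rfl | rfl | rfl | rfl | rfl | rfl
        · exact hni (Nat.dvd_iff_mod_eq_zero.mp hmdvd)
        · exact h2 (dvd_trans (show 2 ∣ i + 1 by omega) hmdvd)
        · exact hni2 (Nat.dvd_iff_mod_eq_zero.mp hmdvd)
        · exact h2 (dvd_trans (show 2 ∣ i + 3 by omega) hmdvd)
        · exact h3 (dvd_trans (show 3 ∣ i + 4 by omega) hmdvd)
        · exact h2 (dvd_trans (show 2 ∣ i + 5 by omega) hmdvd)
  case isFalse h =>
    have hp : Nat.Prime n := by
      by_contra hnp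
      have hq := Nat.minFac_prime (show n ≠ 1 by omega)
      have hsq : n.minFac * n.minFac ≤ n := by
        have := Nat.minFac_sq_le_self (show 0 < n by omega) hnp
        nlinarith [this]
      have hlt : n.minFac < i := by
        have : n.minFac * n.minFac < i * i := by omega
        exact Nat.mul_self_lt_mul_self_iff.mp this
      exact hsmall n.minFac hq.two_le hlt hsq (Nat.minFac_dvd n)
    simp [hp]
termination_by n + 1 - i
decreasing_by
  have : 5 ≤ i := by omega
  have hii : i ≤ i * i := Nat.le_mul_of_pos_left i (by omega)
  omega

-- is_prime decides primality on Nat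
theorem isPrime_eq (n : Nat) : pvIsPrime n = decide (Nat.Prime n) := by
  unfold pvIsPrime
  by_cases h1 : n ≤ 1
  · have : ¬ Nat.Prime n := fun hp => by have := hp.two_le; omega
    simp [h1, this]
  · rw [if_neg h1]
    by_cases h3 : n ≤ 3
    · have hn : n = 2 ∨ n = 3 := by omega
      rcases hn with rfl | rfl <;> simp <;> decide
    · rw [if_neg h3]
      by_cases h23 : n % 2 = 0 || n % 3 = 0
      · rw [if_pos h23]
        have hnp : ¬ Nat.Prime n := by
          intro hp
          have h23' : n % 2 = 0 ∨ n % 3 = 0 := by simpa using h23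
          rcases h23' with hd | hd
          · have : (2 : Nat) ∣ n := Nat.dvd_of_mod_eq_zero hd
            rcases hp.eq_one_or_self_of_dvd 2 this with h' | h' <;> omega
          · have : (3 : Nat) ∣ n := Nat.dvd_of_mod_eq_zero hd
            rcases hp.eq_one_or_self_of_dvd 3 this with h' | h' <;> omega
        simp [hnp]
      · rw [if_neg h23]
        have hn2 : ¬ n % 2 = 0 := by intro hc; exact h23 (by simp [hc])
        have hn3 : ¬ n % 3 = 0 := by intro hc; exact h23 (by simp [hc])
        apply loopA_eq n 5 (by omega) (by omega) (by omega) (by omega)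
        intro m hm2 hmlt hmsq hmdvd
        have : m = 2 ∨ m = 3 ∨ m = 4 := by omega
        rcases this with rfl | rfl | rfl
        · exact absurd hmdvd (by omega)
        · exact absurd hmdvd (by omega)
        · exact absurd (dvd_trans (by norm_num) hmdvd) (show ¬ (2:Nat) ∣ n by omega)

-- B's trial division by a complete sorted list of the small prime divisors decides primality
theorem trialDiv_eq (num : Nat) (l : List Nat) (h2 : 2 ≤ num)
    (hmem : ∀ p ∈ l, 2 ≤ p ∧ p < num)
    (hcomp : ∀ q, Nat.Prime q → q ∣ num → q * q ≤ num → q ∈ l)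
    (hsort : l.Pairwise (· ≤ ·)) :
    pvTrialDiv num l = decide (Nat.Prime num) := by
  induction l with
  | nil =>
    have hp : Nat.Prime num := by
      by_contra hnp
      have hq := Nat.minFac_prime (show num ≠ 1 by omega)
      have hsq : num.minFac * num.minFac ≤ num := by
        have := Nat.minFac_sq_le_self (show 0 < num by omega) hnp
        nlinarith [this]
      have : num.minFac ∈ ([] : List Nat) := hcomp _ hq (Nat.minFac_dvd num) hsq
      simp at this
    simp [pvTrialDiv, hp]
  | cons p ps ih =>
    simp only [pvTrialDiv]
    by_cases hbr : p * p > num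
    · rw [if_pos hbr]
      have hp : Nat.Prime num := by
        by_contra hnp
        have hq := Nat.minFac_prime (show num ≠ 1 by omega)
        have hsq : num.minFac * num.minFac ≤ num := by
          have := Nat.minFac_sq_le_self (show 0 < num by omega) hnp
          nlinarith [this]
        have hqmem := hcomp _ hq (Nat.minFac_dvd num) hsq
        rcases List.mem_cons.mp hqmem with heq | hmemq
        · rw [heq] at hsq; omega
        · have hple : p ≤ num.minFac := (List.pairwise_cons.mp hsort).1 _ hmemq
          nlinarith
      simp [hp]
    · rw [if_neg hbr]
      by_cases hdv : num % p = 0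
      · rw [if_pos hdv]
        have hpd : p ∣ num := Nat.dvd_of_mod_eq_zero hdv
        obtain ⟨hp2, hplt⟩ := hmem p (List.mem_cons_self)
        have hnp : ¬ Nat.Prime num := by
          intro hp
          rcases hp.eq_one_or_self_of_dvd p hpd with h' | h' <;> omega
        simp [hnp]
      · rw [if_neg hdv]
        apply ih
        · intro r hr; exact hmem r (List.mem_cons_of_mem _ hr)
        · intro q hq hqd hqs
          rcases List.mem_cons.mp (hcomp q hq hqd hqs) with heq | hmemq
          · exact absurd (heq ▸ Nat.dvd_iff_mod_eq_zero.mp hqd) hdv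
          · exact hmemq
        · exact (List.pairwise_cons.mp hsort).2

theorem primesBelow_mem (k p : Nat) : p ∈ primesBelow k ↔ p < k ∧ Nat.Prime p := by
  simp [primesBelow, List.mem_filter, List.mem_range]

theorem primesBelow_succ (k : Nat) :
    primesBelow (k + 1) = if Nat.Prime k then primesBelow k ++ [k] else primesBelow k := by
  by_cases h : Nat.Prime k <;>
    simp [primesBelow, List.range_succ, List.filter_append, h]

theorem primesBelow_sorted (k : Nat) : (primesBelow k).Pairwise (· ≤ ·) := by
  exact ((List.pairwise_lt_range).filter _).imp (fun h => Nat.le_of_lt h)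

theorem trialDiv_primesBelow (num : Nat) (h2 : 2 ≤ num) :
    pvTrialDiv num (primesBelow num) = decide (Nat.Prime num) := by
  apply trialDiv_eq num _ h2
  · intro p hp
    rw [primesBelow_mem] at hp
    exact ⟨hp.2.two_le, hp.1⟩
  · intro q hq hdvd hsq
    rw [primesBelow_mem]
    refine ⟨?_, hq⟩
    rcases Nat.lt_or_ge q num with h | h
    · exact h
    · have := Nat.le_of_dvd (by omega) hdvd
      have : q = num := by omega
      subst this
      nlinarith [hq.two_le]
  · exact primesBelow_sorted num

-- the two while-loops produce the same character stream
theorem loops_eq (fuel : Nat) (acc : List Char) (parts : List (List Char)) (total : Int)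
    (num : Nat) (length : Int) (hacc : acc = parts.flatten) (htot : total = (acc.length : Int))
    (h2 : 2 ≤ num) :
    pvLoopA fuel acc num length = (pvLoopB fuel parts total (primesBelow num) num length).flatten := by
  induction fuel generalizing acc parts total num with
  | zero => simpa [pvLoopA, pvLoopB] using hacc
  | succ fuel ih =>
    subst htot; subst hacc
    simp only [pvLoopA, pvLoopB]
    by_cases hlt : ((parts.flatten.length : Int) < length)
    · rw [if_pos hlt, if_pos hlt, trialDiv_primesBelow num h2, ← isPrime_eq]
      by_cases hp : pvIsPrime num
      · rw [if_pos hp, if_pos hp]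
        have hprime : Nat.Prime num := by
          have h' := isPrime_eq num
          rw [hp] at h'
          exact of_decide_eq_true h'.symm
        have heq : primesBelow num ++ [num] = primesBelow (num + 1) := by
          rw [primesBelow_succ, if_pos hprime]
        rw [heq]
        exact ih (parts.flatten ++ binChars num) (parts ++ [binChars num]) _ (num + 1)
          (by simp) (by simp) (by omega)
      · rw [if_neg hp, if_neg (by simpa using hp)]
        have hnp : ¬ Nat.Prime num := by
          intro hc
          exact hp (by rw [isPrime_eq num, decide_eq_true hc])
        have heq : primesBelow num = primesBelow (num + 1) := by
          rw [primesBelow_succ, if_neg hnp]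
        rw [heq]
        exact ih parts.flatten parts _ (num + 1) rfl rfl (by omega)
    · rw [if_neg hlt, if_neg hlt]
-- ===== VERDICT (by name: the statement is the Claim_ definition above) =====
theorem generate_copeland_erdos_spec : Claim_equal_generate_copeland_erdos := by
  intro length _
  unfold Spec_generate_copeland_erdos generate_copeland_erdos generate_copeland_erdos_alt
  have h := loops_eq pvFuel [] [] 0 2 length (by simp) (by simp) (by omega)
  have h2 : primesBelow 2 = [] := by decide
  rw [h2] at h
  rw [h]
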